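-- pv_equiv track=rewrite | github.com/raopriyam/Leetcode-CTCI-Python | findY2.py | findY
-- ===== SOURCE A (Python) =====
-- def findY(n):
--     mid = n // 2
--     cells = set()
--
--     for i in range(mid+1):
--         cells.add((i,i))
--         cells.add((i,n-(i+1)))
--
--     for i in range(mid,n):
--         cells.add((i,mid))
--
--     return len(cells)
-- ===== SOURCE B (Python) =====
-- def findY(n):
--     # closed form: for n >= 1 the Y pattern has 3*(n//2)+1 distinct cells;
--     # an empty (n <= 0) grid has no cells.
--     if n <= 0:
--         return 0
--     return 3 * (n // 2) + 1
-- ===== Notes on version B (the rewrite author's own statement) =====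
-- stated objective: faster
-- what changed: replaces the set-building loops with a closed-form count 3*(n//2)+1 (0 for n<=0), derived by counting the diagonal, anti-diagonal and vertical-stem cells and their overlaps
-- intended difference: for n = 0 A returns 2 (it unconditionally adds cells (0,0) and (0,-1) that do not exist in a 0x0 grid) while B returns 0, the intended count for an empty grid — e.g. on findY(0): A returns 2, B returns 0
import Mathlib
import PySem

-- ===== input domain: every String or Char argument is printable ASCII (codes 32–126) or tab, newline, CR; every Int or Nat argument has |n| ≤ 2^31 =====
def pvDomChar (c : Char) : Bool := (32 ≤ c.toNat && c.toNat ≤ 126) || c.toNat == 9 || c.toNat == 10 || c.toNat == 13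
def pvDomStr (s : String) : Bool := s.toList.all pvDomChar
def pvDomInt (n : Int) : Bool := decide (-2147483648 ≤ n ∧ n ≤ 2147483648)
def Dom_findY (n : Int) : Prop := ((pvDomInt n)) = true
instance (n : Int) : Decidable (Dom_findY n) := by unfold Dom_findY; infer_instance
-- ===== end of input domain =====

-- B replaces A's set-building loops by the closed-form count 3*(n//2)+1 (0 for n ≤ 0): asymptotically faster.

-- ===== PORT A =====
-- Python's 'cells' is a hash set whose iteration order is never consumed (only len(cells) is
-- returned), so it is modelled by an efficient tree set over (Int × Int) with the lexicographic
-- comparator; the loops, the inserted elements and the final length are exactly A's.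
abbrev pvCmp : Int × Int → Int × Int → Ordering :=
  fun a b => compareLex (compareOn (·.1)) (compareOn (·.2)) a b

def findY (n : Int) : Int :=
  let mid := PySem.Int.floordiv n 2
  let cells : Std.TreeSet (Int × Int) pvCmp := Std.TreeSet.empty
  let cells := (PySem.List.pyRange 0 (mid + 1) 1).foldl
      (fun s i => (s.insert (i, i)).insert (i, n - (i + 1))) cells
  let cells := (PySem.List.pyRange mid n 1).foldl (fun s i => s.insert (i, mid)) cells
  (cells.size : Int)

-- ===== PORT B =====
def findY_alt (n : Int) : Int :=
  if n ≤ 0 then 0 else 3 * PySem.Int.floordiv n 2 + 1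

-- ===== PRECONDITION & SPEC =====
-- for n = 0 A returns 2 (it unconditionally adds cells (0,0) and (0,-1) that do not exist in a
-- 0x0 grid) while B returns 0, the intended count for an empty grid
def D_findY (n : Int) : Prop := n = 0
instance (n : Int) : Decidable (D_findY n) := by unfold D_findY; infer_instance
def Spec_findY (n : Int) (out : Int) : Prop := ¬ D_findY n → out = findY_alt n
instance (n : Int) (out : Int) : Decidable (Spec_findY n out) := by unfold Spec_findY; infer_instance
def pvDiffWitness_findY : Int := 0
def pvDiffWitnessOut_findY : Int × Int := (2, 0)

-- ===== CLAIM (what is proved, stated in full; the proofs are below) =====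
def Claim_unchanged_findY : Prop := ∀ (n : Int), Dom_findY n → Spec_findY n (findY n)
def Claim_changed_findY : Prop := Dom_findY (pvDiffWitness_findY) ∧ D_findY (pvDiffWitness_findY) ∧ findY (pvDiffWitness_findY) = pvDiffWitnessOut_findY.1 ∧ findY_alt (pvDiffWitness_findY) = pvDiffWitnessOut_findY.2 ∧ pvDiffWitnessOut_findY.1 ≠ pvDiffWitnessOut_findY.2
def Claim_exact_findY : Prop := ∀ (n : Int), Dom_findY n → D_findY n → findY n ≠ findY_alt n

-- ===== LEMMAS AND PROOFS =====

-- the same computation over the list model of sets (PySem.Set), used as the proof-side spec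
def pvFindYList (n : Int) : Int :=
  PySem.Set.len ((PySem.List.pyRange (PySem.Int.floordiv n 2) n 1).foldl
    (fun t i => PySem.Set.add t (i, PySem.Int.floordiv n 2))
    ((PySem.List.pyRange 0 (PySem.Int.floordiv n 2 + 1) 1).foldl
      (fun s i => PySem.Set.add (PySem.Set.add s (i, i)) (i, n - (i + 1)))
      ([] : PySem.Set (Int × Int))))

theorem pv_tree_mem_insert (t : Std.TreeSet (Int × Int) pvCmp) (x a : Int × Int) :
    a ∈ t.insert x ↔ a = x ∨ a ∈ t := by
  rw [Std.TreeSet.mem_insert]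
  constructor
  · rintro (h | h)
    · left
      have h' : pvCmp x a = Ordering.eq := h
      simp only [pvCmp, compareLex, compareOn, Ordering.then_eq_eq, compare_eq_iff_eq] at h'
      exact (Prod.ext_iff.2 ⟨h'.1.symm, h'.2.symm⟩)
    · exact Or.inr h
  · rintro (h | h)
    · left
      subst h
      simp [pvCmp, compareLex, compareOn]
    · exact Or.inr h

-- the tree-set fold and the PySem.Set fold insert the same elements: same members, same size
theorem pv_tree_sim (xs : List (Int × Int)) :
    ∀ (S : Std.TreeSet (Int × Int) pvCmp) (L : PySem.Set (Int × Int)),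
      (∀ a, a ∈ S ↔ a ∈ L) → S.size = L.length →
      (∀ a, a ∈ xs.foldl (fun t x => t.insert x) S ↔ a ∈ xs.foldl PySem.Set.add L) ∧
      (xs.foldl (fun t x => t.insert x) S).size = (xs.foldl PySem.Set.add L).length := by
  induction xs with
  | nil => intro S L hm hs; exact ⟨hm, hs⟩
  | cons x xs ih =>
    intro S L hm hs
    simp only [List.foldl_cons]
    apply ih
    · intro a
      rw [pv_tree_mem_insert, hm, PySem.Set.mem_add]
      tauto
    · by_cases hx : x ∈ L
      · rw [PySem.Set.add_of_mem hx, Std.TreeSet.size_insert]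
        have hc : S.contains x = true := by
          rw [← Std.TreeSet.mem_iff_contains]; exact (hm x).2 hx
        simp [hc, hs]
      · rw [PySem.Set.add_of_not_mem hx, Std.TreeSet.size_insert]
        have hc : ¬ S.contains x = true := by
          rw [← Std.TreeSet.mem_iff_contains]; intro h; exact hx ((hm x).1 h)
        simp [hc, hs]

-- a loop doing two inserts per element is the one-insert loop over the doubled list
theorem pv_foldl_two {σ : Type} (ins : σ → (Int × Int) → σ) (e1 e2 : Int → Int × Int)
    (ys : List Int) : ∀ init : σ,
    ys.foldl (fun s i => ins (ins s (e1 i)) (e2 i)) init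
      = (ys.flatMap (fun i => [e1 i, e2 i])).foldl ins init := by
  induction ys with
  | nil => intro init; rfl
  | cons y ys ih => intro init; simp only [List.foldl_cons, List.flatMap_cons,
      List.foldl_append, ih]; rfl

theorem pv_foldl_one {σ : Type} (ins : σ → (Int × Int) → σ) (e : Int → Int × Int)
    (ys : List Int) : ∀ init : σ,
    ys.foldl (fun s i => ins s (e i)) init = (ys.map e).foldl ins init := by
  induction ys with
  | nil => intro init; rfl
  | cons y ys ih => intro init; simp only [List.foldl_cons, List.map_cons, ih]

theorem pv_findY_eq_list (n : Int) : findY n = pvFindYList n := by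
  simp only [findY, pvFindYList]
  rw [pv_foldl_two (fun (s : Std.TreeSet (Int × Int) pvCmp) x => s.insert x)
        (fun i => (i, i)) (fun i => (i, n - (i + 1))),
      pv_foldl_two (fun (s : PySem.Set (Int × Int)) x => PySem.Set.add s x)
        (fun i => (i, i)) (fun i => (i, n - (i + 1))),
      pv_foldl_one (fun (t : Std.TreeSet (Int × Int) pvCmp) x => t.insert x)
        (fun i => (i, PySem.Int.floordiv n 2)),
      pv_foldl_one (fun (t : PySem.Set (Int × Int)) x => PySem.Set.add t x)
        (fun i => (i, PySem.Int.floordiv n 2)),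
      ← List.foldl_append, ← List.foldl_append]
  rw [PySem.Set.len,
    (pv_tree_sim _ Std.TreeSet.empty [] (by simp) (by simp)).2]

-- the set built by A's first loop after j iterations, as an explicit list
def pvE (n : Int) : Nat → List (Int × Int)
  | 0 => []
  | j+1 => pvE n j ++ (((j : Int), (j : Int)) ::
      (if n - ((j : Int) + 1) = (j : Int) then [] else [((j : Int), n - ((j : Int) + 1))]))

theorem pvE_fst_lt (n : Int) (j : Nat) : ∀ p ∈ pvE n j, p.1 < (j : Int) := by
  induction j with
  | zero => simp [pvE]
  | succ j ih =>
    intro p hp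
    simp only [pvE, List.mem_append, List.mem_cons] at hp
    push_cast
    rcases hp with h | h | h
    · exact lt_trans (ih p h) (by omega)
    · subst h; simp
    · split at h
      · simp at h
      · simp only [List.mem_singleton] at h
        subst h; simp

theorem pvE_loop1 (n : Int) (j : Nat) :
    (PySem.List.pyRange 0 (j : Int) 1).foldl
      (fun s i => PySem.Set.add (PySem.Set.add s (i, i)) (i, n - (i + 1))) [] = pvE n j := by
  induction j with
  | zero => simp [PySem.List.pyRange_one_eq_nil, pvE]
  | succ j ih =>
    have hsplit : PySem.List.pyRange 0 ((j + 1 : Nat) : Int) 1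
        = PySem.List.pyRange 0 (j : Int) 1 ++ [(j : Int)] := by
      push_cast
      exact PySem.List.pyRange_one_succ_right (by positivity)
    rw [hsplit, List.foldl_append, ih]
    simp only [List.foldl_cons, List.foldl_nil]
    have h1 : ((j : Int), (j : Int)) ∉ pvE n j := by
      intro h; have := pvE_fst_lt n j _ h; simp at this
    rw [PySem.Set.add_of_not_mem h1]
    by_cases hodd : n - ((j : Int) + 1) = (j : Int)
    · have : ((j : Int), n - ((j : Int) + 1)) ∈ pvE n j ++ [((j : Int), (j : Int))] := by
        simp [hodd]
      rw [PySem.Set.add_of_mem this]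
      simp [pvE, hodd]
    · have h2 : ((j : Int), n - ((j : Int) + 1)) ∉ pvE n j ++ [((j : Int), (j : Int))] := by
        intro h
        rcases List.mem_append.1 h with h | h
        · have := pvE_fst_lt n j _ h; simp at this
        · simp only [List.mem_singleton, Prod.mk.injEq] at h
          exact hodd h.2
      rw [PySem.Set.add_of_not_mem h2]
      simp [pvE, hodd]

theorem pvE_length_even (n : Int) (hodd : ∀ i : Int, n ≠ 2 * i + 1) (j : Nat) :
    (pvE n j).length = 2 * j := by
  induction j with
  | zero => simp [pvE]
  | succ j ih =>
    have : n - ((j : Int) + 1) ≠ (j : Int) := by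
      intro h; exact hodd j (by omega)
    simp [pvE, this, ih]; omega

theorem pvE_length_odd (n : Int) (m : Nat) (h : n = 2 * (m : Int) + 1) (j : Nat) :
    (pvE n j).length + (if m < j then 1 else 0) = 2 * j := by
  induction j with
  | zero => simp [pvE]
  | succ j ih =>
    by_cases hj : j = m
    · subst hj
      have hcond : n - ((j : Int) + 1) = (j : Int) := by omega
      simp only [pvE, hcond, if_true, List.length_append, List.length_cons, List.length_nil]
      simp only [Nat.lt_irrefl, if_false] at ih
      simp only [Nat.lt_succ_self, if_true]
      omega
    · have hcond : n - ((j : Int) + 1) ≠ (j : Int) := by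
        intro hc
        have : (j : Int) = (m : Int) := by omega
        exact hj (by exact_mod_cast this)
      simp only [pvE, hcond, if_false, List.length_append, List.length_cons, List.length_nil]
      by_cases hmj : m < j
      · have hmj1 : m < j + 1 := by omega
        simp only [hmj, hmj1, if_true] at ih ⊢
        omega
      · have hmj1 : ¬ m < j + 1 := by omega
        simp only [hmj, hmj1, if_false] at ih ⊢
        omega

-- A's second loop over range(mid+1, mid+1+k), started on a set whose first components are < mid+1
theorem pv_loop2 (mid : Int) (s : List (Int × Int)) (hs : ∀ p ∈ s, p.1 < mid + 1) (k : Nat) :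
    (PySem.List.pyRange (mid + 1) (mid + 1 + (k : Int)) 1).foldl
      (fun t i => PySem.Set.add t (i, mid)) s
      = s ++ (List.range k).map (fun (t : Nat) => (mid + 1 + (t : Int), mid)) := by
  induction k with
  | zero =>
    rw [show mid + 1 + ((0 : Nat) : Int) = mid + 1 by simp,
      PySem.List.pyRange_one_eq_nil le_rfl]
    simp
  | succ k ih =>
    have hsplit : PySem.List.pyRange (mid + 1) (mid + 1 + ((k + 1 : Nat) : Int)) 1
        = PySem.List.pyRange (mid + 1) (mid + 1 + (k : Int)) 1 ++ [mid + 1 + (k : Int)] := by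
      push_cast
      rw [show mid + 1 + ((k : Int) + 1) = (mid + 1 + (k : Int)) + 1 by ring]
      exact PySem.List.pyRange_one_succ_right (by omega)
    rw [hsplit, List.foldl_append, ih]
    simp only [List.foldl_cons, List.foldl_nil]
    have hnot : (mid + 1 + (k : Int), mid) ∉
        s ++ (List.range k).map (fun (t : Nat) => (mid + 1 + (t : Int), mid)) := by
      intro h
      rcases List.mem_append.1 h with h | h
      · have := hs _ h; simp at this; omega
      · simp only [List.mem_map, List.mem_range] at h
        obtain ⟨t, ht, hEq⟩ := h
        have h1 : mid + 1 + (t : Int) = mid + 1 + (k : Int) := congrArg Prod.fst hEq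
        have h2 : (t : Int) = (k : Int) := by omega
        have : t = k := by exact_mod_cast h2
        omega
    rw [PySem.Set.add_of_not_mem hnot]
    simp [List.range_succ]

theorem findY_eq_alt_pos (n : Int) (hn : 1 ≤ n) : findY n = findY_alt n := by
  rw [pv_findY_eq_list]
  have hb : (PySem.Int.floordiv n 2) * 2 ≤ n ∧ n < (PySem.Int.floordiv n 2 + 1) * 2 :=
    (PySem.Int.floordiv_eq_iff_of_pos (by norm_num)).1 rfl
  set mid := PySem.Int.floordiv n 2 with hmiddef
  have h0 : 0 ≤ mid := by omega
  obtain ⟨m, hm⟩ : ∃ m : Nat, mid = (m : Int) := ⟨mid.toNat, (Int.toNat_of_nonneg h0).symm⟩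
  obtain ⟨k, hk⟩ : ∃ k : Nat, n = mid + 1 + (k : Int) :=
    ⟨(n - mid - 1).toNat, by rw [Int.toNat_of_nonneg (by omega)]; ring⟩
  have hrange1 : mid + 1 = ((m + 1 : Nat) : Int) := by push_cast; omega
  have hfold1 : (PySem.List.pyRange 0 (mid + 1) 1).foldl
      (fun s i => PySem.Set.add (PySem.Set.add s (i, i)) (i, n - (i + 1)))
      ([] : PySem.Set (Int × Int)) = pvE n (m + 1) := by
    rw [hrange1]; exact pvE_loop1 n (m + 1)
  have hs : ∀ p ∈ pvE n (m + 1), p.1 < mid + 1 := by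
    intro p hp
    have := pvE_fst_lt n (m + 1) p hp
    rw [hrange1]; exact this
  have hdiag : ((m : Int), (m : Int)) ∈ pvE n (m + 1) := by simp [pvE]
  have hcons : PySem.List.pyRange mid n 1 = mid :: PySem.List.pyRange (mid + 1) n 1 :=
    PySem.List.pyRange_one_cons (by omega)
  have hstep : PySem.Set.add (pvE n (m + 1)) (mid, mid) = pvE n (m + 1) :=
    PySem.Set.add_of_mem (by rw [hm]; exact hdiag)
  have hfold2 : (PySem.List.pyRange mid n 1).foldl
      (fun t i => PySem.Set.add t (i, mid)) (pvE n (m + 1))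
      = pvE n (m + 1) ++ (List.range k).map (fun (t : Nat) => (mid + 1 + (t : Int), mid)) := by
    rw [hcons]
    simp only [List.foldl_cons, hstep]
    have h := pv_loop2 mid (pvE n (m + 1)) hs k
    rw [← hk] at h
    exact h
  have hfindY : pvFindYList n = (((pvE n (m + 1)).length + k : Nat) : Int) := by
    unfold pvFindYList
    rw [← hmiddef, hfold1, hfold2]
    simp [PySem.Set.len]
  have halt : findY_alt n = 3 * mid + 1 := by
    simp only [findY_alt, ← hmiddef, if_neg (by omega : ¬ n ≤ 0)]
  rw [hfindY, halt]
  rcases Int.even_or_odd n with ⟨c, hc⟩ | ⟨c, hc⟩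
  · have hlen : (pvE n (m + 1)).length = 2 * (m + 1) :=
      pvE_length_even n (by intro i; omega) (m + 1)
    rw [hlen]; push_cast; omega
  · have hcm : n = 2 * (m : Int) + 1 := by omega
    have hlen := pvE_length_odd n m hcm (m + 1)
    simp only [Nat.lt_succ_self, if_true] at hlen
    have : (pvE n (m + 1)).length = 2 * m + 1 := by omega
    rw [this]; push_cast; omega

theorem findY_eq_zero_neg (n : Int) (hn : n < 0) : findY n = findY_alt n := by
  rw [pv_findY_eq_list]
  have hb : (PySem.Int.floordiv n 2) * 2 ≤ n ∧ n < (PySem.Int.floordiv n 2 + 1) * 2 :=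
    (PySem.Int.floordiv_eq_iff_of_pos (by norm_num)).1 rfl
  set mid := PySem.Int.floordiv n 2 with hmiddef
  have h1 : PySem.List.pyRange 0 (mid + 1) 1 = [] :=
    PySem.List.pyRange_one_eq_nil (by omega)
  have h2 : PySem.List.pyRange mid n 1 = [] :=
    PySem.List.pyRange_one_eq_nil (by omega)
  simp only [pvFindYList, findY_alt, ← hmiddef, h1, h2, List.foldl_nil, PySem.Set.len,
    if_pos (by omega : n ≤ 0)]
  rfl

-- ===== VERDICT (by name: the statement is the Claim_ definition above) =====
theorem findY_spec : Claim_unchanged_findY := by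
  intro n _ hD
  unfold D_findY at hD
  rcases lt_trichotomy n 0 with h | h | h
  · exact findY_eq_zero_neg n h
  · exact absurd h hD
  · exact findY_eq_alt_pos n (by omega)

theorem findY_changed : Claim_changed_findY := by
  unfold Claim_changed_findY
  refine ⟨by decide, by decide, ?_, by decide, by decide⟩
  rw [show pvDiffWitness_findY = (0 : Int) from rfl, pv_findY_eq_list]
  decide

theorem findY_tight : Claim_exact_findY := by
  intro n _ hD
  unfold D_findY at hD; subst hD
  rw [pv_findY_eq_list]
  decide
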